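-- pv_equiv track=rewrite | github.com/manas2829/Data-Science-Master-Assignment_07 | PW_DATA SCIENCE MASTER CLASS_ Assigment_07.py | encrypt_sentence
-- ===== SOURCE A (Python) =====
-- def encrypt_sentence(sentence):
--     sentence = sentence.lower() # convert to lowercase
--     encrypted_sentence = ""
--     for char in sentence:
--         if char == " ": # replace whitespace with dollar sign
--             encrypted_sentence += "$"
--         elif char.isalpha(): # replace letters with corresponding letters from end of alphabet
--             encrypted_sentence += chr(122 - ord(char) + 97)
--         else: # keep punctuation marks unchanged
--             encrypted_sentence += char
--     return encrypted_sentence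
-- ===== SOURCE B (Python) =====
-- # B: staged passes — split on spaces / join with '$' (no per-char space branch),
-- # letters mapped by position lookup into a reversed alphabet literal (no ord/chr arithmetic).
-- AB = "abcdefghijklmnopqrstuvwxyz"
-- BA = AB[::-1]
--
-- def encrypt_sentence(sentence):
--     def enc(word):
--         return "".join(BA[AB.find(c)] if c in AB else c for c in word)
--     return "$".join(enc(word) for word in sentence.lower().split(" "))
-- ===== Notes on version B (the rewrite author's own statement) =====
-- stated objective: alternative
-- what changed: Replaces A's single per-character loop with its three-way branch by staged passes: split the lowered sentence on spaces and rejoin the pieces with a dollar sign (the space case disappears into the join), mapping letters by position lookup into a reversed alphabet string instead of chr/ord arithmetic.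
import Mathlib
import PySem

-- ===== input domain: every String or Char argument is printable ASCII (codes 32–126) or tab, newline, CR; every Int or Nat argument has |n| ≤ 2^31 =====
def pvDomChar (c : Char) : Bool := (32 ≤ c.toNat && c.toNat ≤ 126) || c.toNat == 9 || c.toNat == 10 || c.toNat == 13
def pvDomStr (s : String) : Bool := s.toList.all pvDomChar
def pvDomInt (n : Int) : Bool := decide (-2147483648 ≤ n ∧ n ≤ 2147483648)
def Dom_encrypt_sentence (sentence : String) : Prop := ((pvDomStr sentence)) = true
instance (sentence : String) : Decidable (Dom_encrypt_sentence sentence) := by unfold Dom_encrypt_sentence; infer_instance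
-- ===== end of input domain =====

-- B replaces A's per-character loop (branching on space/letter/other) by staged passes:
-- split on spaces / join with '$', letters mapped by lookup into a reversed alphabet literal. Return value only.

-- ===== PORT A =====
-- one loop step of A: the string appended for char c
def encStep (c : Char) : String :=
  if c == ' ' then "$"
  else if PySem.Chars.isalpha c then String.ofList [Char.ofNat (Int.toNat (122 - (c.toNat : Int) + 97))]
  else String.ofList [c]

def encrypt_sentence (sentence : String) : String :=
  (PySem.Str.lower sentence).toList.foldl (fun acc c => acc ++ encStep c) ""

-- ===== PORT B =====
-- module constants: AB = "abcdefghijklmnopqrstuvwxyz", BA = AB[::-1]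
def pvAB : List Char := "abcdefghijklmnopqrstuvwxyz".toList
def pvBA : List Char := (PySem.List.slice? pvAB none none (-1)).getD []

-- one generator element of B's inner join: BA[AB.find(c)] if c in AB else c
def encChar (c : Char) : Char :=
  if PySem.Chars.isIn [c] pvAB then PySem.List.pyGetD pvBA (PySem.Chars.find pvAB [c]) c else c

def encrypt_sentence_alt (sentence : String) : String :=
  String.ofList (PySem.Chars.join ['$']
    ((PySem.Chars.splitOn (PySem.Chars.lower sentence.toList) [' ']).map
      (fun w => PySem.Chars.join [] (w.map (fun c => [encChar c])))))

-- ===== PRECONDITION & SPEC =====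
def Spec_encrypt_sentence (sentence : String) (out : String) : Prop := out = encrypt_sentence_alt sentence
instance (sentence : String) (out : String) : Decidable (Spec_encrypt_sentence sentence out) := by unfold Spec_encrypt_sentence; infer_instance

-- ===== CLAIM (what is proved, stated in full; the proofs are below) =====
def Claim_equal_encrypt_sentence : Prop := ∀ (sentence : String), Dom_encrypt_sentence sentence → Spec_encrypt_sentence sentence (encrypt_sentence sentence)

-- ===== LEMMAS AND PROOFS =====

-- structural re-statement of splitOn on the single-char separator ' ' (proof-only helper)
def pvSplits (pre : List Char) : List Char → List (List Char)
  | [] => [pre]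
  | c :: l => if c = ' ' then pre :: pvSplits [] l else pvSplits (pre ++ [c]) l

lemma pvSplits_ne_nil (pre : List Char) (l : List Char) : pvSplits pre l ≠ [] := by
  induction l generalizing pre with
  | nil => simp [pvSplits]
  | cons c l ih => by_cases h : c = ' ' <;> simp [pvSplits, h, ih]

lemma splitOn_go_eq (l : List Char) : ∀ (fuel : Nat) (cur : List Char) (acc : List (List Char)),
    l.length < fuel →
    PySem.Chars.splitOn.go [' '] fuel l cur acc = acc.reverse ++ pvSplits cur.reverse l := by
  induction l with
  | nil =>
    intro fuel cur acc h
    match fuel with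
    | fuel + 1 => simp [PySem.Chars.splitOn.go, pvSplits]
  | cons c l ih =>
    intro fuel cur acc h
    match fuel with
    | fuel + 1 =>
      by_cases hc : c = ' '
      · subst hc
        simp only [PySem.Chars.splitOn.go, List.isPrefixOf, beq_self_eq_true, Bool.true_and,
          if_true]
        rw [show List.drop [' '].length (' ' :: l) = l from rfl,
          ih fuel [] (cur.reverse :: acc) (by simpa using Nat.lt_of_succ_lt_succ h)]
        simp [pvSplits]
      · have hpre : [' '].isPrefixOf (c :: l) = false := by
          simp [List.isPrefixOf]; exact fun h' => absurd h'.symm hc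
        simp only [PySem.Chars.splitOn.go, hpre, Bool.false_eq_true, if_false]
        rw [ih fuel (c :: cur) acc (by simpa using Nat.lt_of_succ_lt_succ h)]
        simp [pvSplits, hc]

lemma splitOn_eq (l : List Char) : PySem.Chars.splitOn l [' '] = pvSplits [] l := by
  unfold PySem.Chars.splitOn
  rw [splitOn_go_eq l (l.length + 1) [] [] (Nat.lt_succ_self _)]
  simp

-- the per-char function B realises through split/join: '$' on the space, encChar elsewhere
def pvH (c : Char) : Char := if c = ' ' then '$' else encChar c

lemma join_pvSplits (l : List Char) : ∀ (pre : List Char),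
    PySem.Chars.join ['$'] ((pvSplits pre l).map (List.map encChar)) =
      pre.map encChar ++ l.map pvH := by
  induction l with
  | nil => intro pre; simp [pvSplits, PySem.Chars.join_singleton]
  | cons c l ih =>
    intro pre
    by_cases hc : c = ' '
    · subst hc
      simp only [pvSplits, List.map_cons, if_pos trivial]
      obtain ⟨w, ws, hws⟩ : ∃ w ws, pvSplits [] l = w :: ws := by
        cases h : pvSplits [] l with
        | nil => exact absurd h (pvSplits_ne_nil [] l)
        | cons w ws => exact ⟨_, _, rfl⟩
      rw [hws, List.map_cons, PySem.Chars.join_cons_cons, ← List.map_cons, ← hws, ih []]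
      simp [pvH]
    · simp only [pvSplits, if_neg hc]
      rw [ih (pre ++ [c])]
      simp [pvH, hc]

-- pointwise agreement of A's step with pvH on every lowercased domain character (all 128 ASCII codes)
set_option maxRecDepth 40000 in
lemma enc_pointwise_range : ∀ n ∈ List.range 128,
    pvDomChar (Char.ofNat n) = true →
    (encStep (PySem.Chars.lowerChar (Char.ofNat n))).toList = [pvH (PySem.Chars.lowerChar (Char.ofNat n))] := by
  decide

lemma enc_pointwise (c : Char) (h : pvDomChar c = true) :
    (encStep (PySem.Chars.lowerChar c)).toList = [pvH (PySem.Chars.lowerChar c)] := by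
  have hlt : c.toNat < 128 := by
    simp only [pvDomChar, Bool.or_eq_true, Bool.and_eq_true, decide_eq_true_eq, beq_iff_eq] at h
    omega
  have hc : Char.ofNat c.toNat = c := Char.ofNat_toNat c
  have := enc_pointwise_range c.toNat (List.mem_range.mpr hlt) (by rwa [hc])
  rwa [hc] at this

lemma foldl_enc : ∀ (l : List Char) (acc : String), (∀ c ∈ l, pvDomChar c = true) →
    (l.foldl (fun acc c => acc ++ encStep (PySem.Chars.lowerChar c)) acc).toList =
      acc.toList ++ l.map (fun c => pvH (PySem.Chars.lowerChar c))
  | [], acc, _ => by simp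
  | c :: l, acc, h => by
    simp only [List.foldl_cons, List.map_cons]
    rw [foldl_enc l _ (fun x hx => h x (List.mem_cons_of_mem _ hx))]
    simp [enc_pointwise c (h c (List.mem_cons_self ..))]

-- ===== VERDICT (by name: the statement is the Claim_ definition above) =====
theorem encrypt_sentence_spec : Claim_equal_encrypt_sentence := by
  intro s hs
  unfold Spec_encrypt_sentence encrypt_sentence encrypt_sentence_alt
  have hl : (PySem.Str.lower s).toList = s.toList.map PySem.Chars.lowerChar := by
    simp [PySem.Str.toList_lower, PySem.Chars.lower]
  apply String.ext
  rw [hl, List.foldl_map]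
  have hdom : ∀ c ∈ s.toList, pvDomChar c = true := by
    have := hs; unfold Dom_encrypt_sentence pvDomStr at this
    simpa [List.all_eq_true] using this
  rw [foldl_enc s.toList "" hdom]
  have hjoin : ∀ w : List Char,
      PySem.Chars.join [] (w.map (fun c => [encChar c])) = w.map encChar := by
    intro w
    have := PySem.Chars.join_nil_singletons (w.map encChar)
    simpa [List.map_map] using this
  simp only [hjoin]
  rw [show PySem.Chars.lower s.toList = s.toList.map PySem.Chars.lowerChar from by
        simp [PySem.Chars.lower],
      splitOn_eq, join_pvSplits _ []]
  simp [List.map_map]
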